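-- pv_equiv track=rewrite | github.com/JoeFlow01/CompilersPhase1G29 | main.py | tokenlister
-- ===== SOURCE A (Python) =====
-- numbers = "0123456789"
--
-- operators = "+-*/"
--
-- letters = "abcdefghijklmnopqrstuvwxyzABCDEFGHIJKLMNOPQRSTUVWXYZ"
--
-- def IdentifierChecker(word):
--     if word[0] not in letters:
--         return False
--     for i in word:
--         if((i not in letters) and (i not in numbers)):
--             return False
--     return True
--
-- def operatorchecker(word):
--     if len(word) > 1:
--         return False
--     if word[0] not in operators:
--         return False
--     return True
--
-- def numchecker(word):
--     if (word.count(".") > 1):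
--         return False
--     if((word[0]==".") or (word[len(word)-1]==".")):
--         return False
--     for i in word:
--         if((i not in numbers) and i!="."):
--             return False
--     return True
--
-- def tokenlister(sentence):
--     #if expressionchecker(sentence)=="Not accepted":
--      #   return "Not a valid expression"
--     mylist=[]
--     splited_sentence = sentence.split()
--     for i in splited_sentence:
--         if(IdentifierChecker(i)):
--             mylist.append("ID")
--         elif(numchecker(i)):
--             mylist.append("Number")
--         elif(operatorchecker(i)):
--             mylist.append("Operator")
--         else:
--             mylist.append("Unknown_token")
--     return mylist
-- ===== SOURCE B (Python) =====
-- def tokenlister(sentence):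
--     out = []
--     for tok in sentence.split():
--         alpha = digit = dot = op = 0
--         for ch in tok:
--             if ch.isalpha():
--                 alpha += 1
--             elif ch.isdigit():
--                 digit += 1
--             elif ch == '.':
--                 dot += 1
--             elif ch in '+-*/':
--                 op += 1
--         n = len(tok)
--         if tok[0].isalpha() and alpha + digit == n:
--             out.append("ID")
--         elif dot <= 1 and digit + dot == n and tok[0] != '.' and tok[-1] != '.':
--             out.append("Number")
--         elif op == 1 and n == 1:
--             out.append("Operator")
--         else:
--             out.append("Unknown_token")
--     return out
-- ===== Notes on version B (the rewrite author's own statement) =====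
-- stated objective: alternative
-- what changed: A classifies each token with three early-return scanner helpers (identifier/number/operator checks, each rescanning the token); B makes a single counting pass per token tallying the four character classes (alpha, digit, dot, operator) and classifies by arithmetic on the counts and the end characters.
import Mathlib
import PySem

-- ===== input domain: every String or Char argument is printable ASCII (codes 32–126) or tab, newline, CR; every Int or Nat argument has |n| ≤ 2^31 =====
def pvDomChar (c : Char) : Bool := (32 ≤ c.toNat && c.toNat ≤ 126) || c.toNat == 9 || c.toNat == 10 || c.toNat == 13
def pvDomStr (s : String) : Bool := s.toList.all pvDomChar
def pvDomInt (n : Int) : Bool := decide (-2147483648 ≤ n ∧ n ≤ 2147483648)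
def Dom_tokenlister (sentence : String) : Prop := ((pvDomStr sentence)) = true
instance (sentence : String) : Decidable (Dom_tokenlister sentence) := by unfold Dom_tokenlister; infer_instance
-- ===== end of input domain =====

-- B replaces A's three early-return scanner helpers by ONE counting pass per token
-- (a census of character classes) followed by arithmetic comparisons (objective: alternative).

-- ===== PORT A =====
-- module constants: numbers / operators / letters (char membership in a string literal)
def pvNumbers : List Char := ['0','1','2','3','4','5','6','7','8','9']
def pvOperators : List Char := ['+','-','*','/']
def pvLetters : List Char :=
  ['a','b','c','d','e','f','g','h','i','j','k','l','m','n','o','p','q','r','s','t','u','v','w','x','y','z',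
   'A','B','C','D','E','F','G','H','I','J','K','L','M','N','O','P','Q','R','S','T','U','V','W','X','Y','Z']

def IdentifierChecker (word : List Char) : Bool :=
  match PySem.List.pyGet? word 0 with
  | none => false   -- word[0] raises IndexError on empty word; unreachable (split() yields nonempty tokens)
  | some c0 =>
    if !(pvLetters.contains c0) then false
    else word.all (fun i => pvLetters.contains i || pvNumbers.contains i)

def operatorchecker (word : List Char) : Bool :=
  if word.length > 1 then false
  else match PySem.List.pyGet? word 0 with
    | none => false  -- unreachable (nonempty tokens)
    | some c0 => pvOperators.contains c0

def numchecker (word : List Char) : Bool :=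
  -- word.count(".") with a 1-char needle is exactly List.count '.'
  if word.count '.' > 1 then false
  else match PySem.List.pyGet? word 0, PySem.List.pyGet? word ((word.length : Int) - 1) with
    | some a, some b =>
      if a == '.' || b == '.' then false
      else word.all (fun i => pvNumbers.contains i || i == '.')
    | _, _ => false  -- unreachable (nonempty tokens)

def tokenlister (sentence : String) : List String :=
  (PySem.Str.split₀ sentence).foldl (fun mylist i =>
    if IdentifierChecker i.toList then mylist ++ ["ID"]
    else if numchecker i.toList then mylist ++ ["Number"]
    else if operatorchecker i.toList then mylist ++ ["Operator"]
    else mylist ++ ["Unknown_token"]) []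

-- ===== PORT B =====
-- one pass over the token counting (alpha, digit, dot, op) characters
def pvStep (acc : Nat × Nat × Nat × Nat) (ch : Char) : Nat × Nat × Nat × Nat :=
  if PySem.Chars.isalpha ch then (acc.1 + 1, acc.2.1, acc.2.2.1, acc.2.2.2)
  else if PySem.Chars.isdigit ch then (acc.1, acc.2.1 + 1, acc.2.2.1, acc.2.2.2)
  else if ch == '.' then (acc.1, acc.2.1, acc.2.2.1 + 1, acc.2.2.2)
  else if PySem.Chars.isIn [ch] ['+','-','*','/'] then (acc.1, acc.2.1, acc.2.2.1, acc.2.2.2 + 1)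
  else acc

def pvCensus (tok : List Char) : Nat × Nat × Nat × Nat :=
  tok.foldl pvStep (0, 0, 0, 0)

def tokenlister_alt (sentence : String) : List String :=
  (PySem.Str.split₀ sentence).foldl (fun out tok =>
    let cs := tok.toList
    let c := pvCensus cs
    let n := cs.length
    if (match PySem.List.pyGet? cs 0 with
        | some h => PySem.Chars.isalpha h
        | none => false) && (c.1 + c.2.1 == n) then out ++ ["ID"]
    else if (c.2.2.1 ≤ 1) && (c.2.1 + c.2.2.1 == n)
        && !(PySem.List.pyGet? cs 0 == some '.') && !(PySem.List.pyGet? cs (-1) == some '.') then out ++ ["Number"]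
    else if (c.2.2.2 == 1) && (n == 1) then out ++ ["Operator"]
    else out ++ ["Unknown_token"]) []

-- ===== PRECONDITION & SPEC =====
def Spec_tokenlister (sentence : String) (out : List String) : Prop := out = tokenlister_alt sentence
instance (sentence : String) (out : List String) : Decidable (Spec_tokenlister sentence out) := by unfold Spec_tokenlister; infer_instance

-- ===== CLAIM (what is proved, stated in full; the proofs are below) =====
def Claim_equal_tokenlister : Prop := ∀ (sentence : String), Dom_tokenlister sentence → Spec_tokenlister sentence (tokenlister sentence)

-- ===== LEMMAS AND PROOFS =====

-- per-char class lemmas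
theorem pv_contains_letters (c : Char) : pvLetters.contains c = PySem.Chars.isalpha c := by
  rw [Bool.eq_iff_iff]
  simp [pvLetters, PySem.Chars.isalpha, PySem.Chars.isupper, PySem.Chars.islower,
    List.contains_eq_mem, List.mem_cons, Char.ext_iff, Char.le_def, UInt32.le_iff_toNat_le, UInt32.ext_iff]
  omega

theorem pv_contains_numbers (c : Char) : pvNumbers.contains c = PySem.Chars.isdigit c := by
  rw [Bool.eq_iff_iff]
  simp [pvNumbers, PySem.Chars.isdigit, List.contains_eq_mem, List.mem_cons, Char.ext_iff, Char.le_def,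
    UInt32.le_iff_toNat_le, UInt32.ext_iff]
  omega

theorem pv_alpha_not_digit (c : Char) (h : PySem.Chars.isalpha c = true) : PySem.Chars.isdigit c = false := by
  simp [PySem.Chars.isalpha, PySem.Chars.isdigit, PySem.Chars.isupper, PySem.Chars.islower,
    Char.le_def, UInt32.le_iff_toNat_le] at *
  omega

theorem pv_isIn_singleton (ch : Char) (l : List Char) : PySem.Chars.isIn [ch] l = l.contains ch := by
  rw [Bool.eq_iff_iff, PySem.Chars.isIn_iff_infix]
  simp [List.contains_eq_mem]
  constructor
  · intro h; exact h.mem (by simp)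
  · intro h
    obtain ⟨s, t, rfl⟩ := List.append_of_mem h
    exact ⟨s, t, by simp⟩

-- census predicates (the classes counted by B's single pass, in branch order)
def pvPA (ch : Char) : Bool := PySem.Chars.isalpha ch
def pvPD (ch : Char) : Bool := !PySem.Chars.isalpha ch && PySem.Chars.isdigit ch
def pvPDot (ch : Char) : Bool := !PySem.Chars.isalpha ch && !PySem.Chars.isdigit ch && (ch == '.')
def pvPOp (ch : Char) : Bool :=
  !PySem.Chars.isalpha ch && !PySem.Chars.isdigit ch && !(ch == '.') && PySem.Chars.isIn [ch] ['+','-','*','/']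

theorem pvPD_eq (ch : Char) : pvPD ch = PySem.Chars.isdigit ch := by
  unfold pvPD
  by_cases h : PySem.Chars.isalpha ch = true
  · simp [h, pv_alpha_not_digit ch h]
  · simp [Bool.not_eq_true] at h; simp [h]

theorem pvPDot_eq (ch : Char) : pvPDot ch = (ch == '.') := by
  unfold pvPDot
  by_cases h : ch = '.'
  · subst h; decide
  · simp [h]

theorem pvPOp_eq (ch : Char) : pvPOp ch = pvOperators.contains ch := by
  unfold pvPOp
  rw [pv_isIn_singleton]
  by_cases h : pvOperators.contains ch = true
  · have : ch ∈ pvOperators := by simpa [List.contains_eq_mem] using h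
    have : ch ∈ (['+','-','*','/'] : List Char) := this
    fin_cases this <;> decide
  · simp only [Bool.not_eq_true] at h
    simp [pvOperators] at h ⊢
    simp [h]

-- the census fold computes the four class counts
theorem pvCensus_foldl (l : List Char) : ∀ (a b c d : Nat),
    l.foldl pvStep (a, b, c, d)
    = (a + l.countP pvPA, b + l.countP pvPD, c + l.countP pvPDot, d + l.countP pvPOp) := by
  induction l with
  | nil => intro a b c d; simp
  | cons ch rest ih =>
    intro a b c d
    simp only [List.foldl_cons, List.countP_cons]
    by_cases h1 : PySem.Chars.isalpha ch = true
    · rw [show pvStep (a, b, c, d) ch = (a + 1, b, c, d) from by simp [pvStep, h1], ih]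
      simp [pvPA, pvPD, pvPDot, pvPOp, h1]
      omega
    · simp only [Bool.not_eq_true] at h1
      by_cases h2 : PySem.Chars.isdigit ch = true
      · rw [show pvStep (a, b, c, d) ch = (a, b + 1, c, d) from by simp [pvStep, h1, h2], ih]
        simp [pvPA, pvPD, pvPDot, pvPOp, h1, h2]
        omega
      · simp only [Bool.not_eq_true] at h2
        by_cases h3 : (ch == '.') = true
        · rw [show pvStep (a, b, c, d) ch = (a, b, c + 1, d) from by simp [pvStep, h1, h2, h3], ih]
          simp [pvPA, pvPD, pvPDot, pvPOp, h1, h2, h3]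
          omega
        · simp only [Bool.not_eq_true] at h3
          by_cases h4 : PySem.Chars.isIn [ch] ['+','-','*','/'] = true
          · rw [show pvStep (a, b, c, d) ch = (a, b, c, d + 1) from by simp [pvStep, h1, h2, h3, h4], ih]
            simp [pvPA, pvPD, pvPDot, pvPOp, h1, h2, h3, h4]
            omega
          · simp only [Bool.not_eq_true] at h4
            rw [show pvStep (a, b, c, d) ch = (a, b, c, d) from by simp [pvStep, h1, h2, h3, h4], ih]
            simp [pvPA, pvPD, pvPDot, pvPOp, h1, h2, h3, h4]

theorem pvCensus_eq (l : List Char) :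
    pvCensus l = (l.countP pvPA, l.countP pvPD, l.countP pvPDot, l.countP pvPOp) := by
  unfold pvCensus
  rw [pvCensus_foldl]
  simp

-- counting two disjoint classes covers the list iff every element is in one of them
theorem pv_countP_or (p q : Char → Bool) (hpq : ∀ ch, p ch = true → q ch = false) (l : List Char) :
    l.countP p + l.countP q = l.countP (fun ch => p ch || q ch) := by
  induction l with
  | nil => simp
  | cons ch rest ih =>
    simp only [List.countP_cons]
    by_cases h1 : p ch = true
    · simp [h1, hpq ch h1]; omega
    · simp only [Bool.not_eq_true] at h1
      by_cases h2 : q ch = true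
      · simp [h1, h2]; omega
      · simp only [Bool.not_eq_true] at h2
        simp [h1, h2]; omega

theorem pv_all_eq_countP (p : Char → Bool) (l : List Char) :
    l.all p = (l.countP p == l.length) := by
  rw [Bool.eq_iff_iff, List.all_eq_true, Nat.beq_eq_true_eq, List.countP_eq_length]

-- per-token label functions (the branch chains of the two loop bodies)
def pvLabelA (cs : List Char) : String :=
  if IdentifierChecker cs then "ID"
  else if numchecker cs then "Number"
  else if operatorchecker cs then "Operator"
  else "Unknown_token"

def pvLabelB (cs : List Char) : String :=
  let c := pvCensus cs
  let n := cs.length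
  if (match PySem.List.pyGet? cs 0 with
      | some h => PySem.Chars.isalpha h
      | none => false) && (c.1 + c.2.1 == n) then "ID"
  else if (c.2.2.1 ≤ 1) && (c.2.1 + c.2.2.1 == n)
      && !(PySem.List.pyGet? cs 0 == some '.') && !(PySem.List.pyGet? cs (-1) == some '.') then "Number"
  else if (c.2.2.2 == 1) && (n == 1) then "Operator"
  else "Unknown_token"

theorem pv_pyGet_zero (c : Char) (r : List Char) : PySem.List.pyGet? (c :: r) 0 = some c := by
  simp [PySem.List.pyGet?, PySem.List.pyIdx?]

theorem pv_pyGet_neg_one (c : Char) (r : List Char) :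
    PySem.List.pyGet? (c :: r) (-1) = (c :: r).getLast? := by
  simp [PySem.List.pyGet?, PySem.List.pyIdx?, List.getLast?_eq_getElem?]

theorem pv_pyGet_len_sub_one (c : Char) (r : List Char) :
    PySem.List.pyGet? (c :: r) (((c :: r).length : Int) - 1) = (c :: r).getLast? := by
  simp [PySem.List.pyGet?, PySem.List.pyIdx?, List.getLast?_eq_getElem?]

-- branch condition equalities on a nonempty token
theorem pv_id_eq (c : Char) (r : List Char) :
    IdentifierChecker (c :: r)
      = (PySem.Chars.isalpha c && ((c :: r).countP pvPA + (c :: r).countP pvPD == (c :: r).length)) := by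
  unfold IdentifierChecker
  simp only [pv_pyGet_zero]
  rw [pv_contains_letters c]
  by_cases h : PySem.Chars.isalpha c = true
  · simp only [h, Bool.not_true, Bool.false_eq_true, if_false, Bool.true_and]
    have hcong : ((c :: r).all fun i => pvLetters.contains i || pvNumbers.contains i)
        = ((c :: r).all fun i => pvPA i || pvPD i) := by
      simp only [pv_contains_letters, pv_contains_numbers, pvPA, pvPD_eq]
    rw [hcong, pv_all_eq_countP, ← pv_countP_or]
    intro ch hch
    have h' : PySem.Chars.isalpha ch = true := hch
    simp [pvPD, h']
  · simp only [Bool.not_eq_true] at h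
    simp [h]

theorem pv_num_eq (c : Char) (r : List Char) :
    numchecker (c :: r)
      = ((c :: r).countP pvPDot ≤ 1 && ((c :: r).countP pvPD + (c :: r).countP pvPDot == (c :: r).length)
          && !(c == '.') && !((c :: r).getLast? == some '.')) := by
  unfold numchecker
  have hne : (c :: r) ≠ ([] : List Char) := by simp
  simp only [pv_pyGet_zero, pv_pyGet_len_sub_one, List.getLast?_eq_some_getLast hne,
    Option.some_beq_some]
  have hcount : List.count '.' (c :: r) = List.countP pvPDot (c :: r) := by
    rw [List.count_eq_countP]
    apply List.countP_congr
    intro a _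
    simp [pvPDot_eq]
  have hall : ((c :: r).all fun i => pvNumbers.contains i || i == '.')
      = (List.countP pvPD (c :: r) + List.countP pvPDot (c :: r) == (c :: r).length) := by
    have hcong : ((c :: r).all fun i => pvNumbers.contains i || i == '.')
        = ((c :: r).all fun i => pvPD i || pvPDot i) := by
      simp only [pv_contains_numbers, pvPD_eq, pvPDot_eq]
    rw [hcong, pv_all_eq_countP, ← pv_countP_or]
    intro ch hch
    rw [pvPD_eq] at hch
    simp [pvPDot, hch]
  rw [hcount, hall]
  by_cases h1 : List.countP pvPDot (c :: r) > 1
  · rw [if_pos h1]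
    have h1' : ¬ (List.countP pvPDot (c :: r) ≤ 1) := by omega
    simp [h1']
  · rw [if_neg h1]
    have h1' : List.countP pvPDot (c :: r) ≤ 1 := by omega
    by_cases h2 : (c == '.' || (c :: r).getLast hne == '.') = true
    · rw [if_pos h2]
      rcases (Bool.or_eq_true _ _).mp h2 with h | h <;> simp [h]
    · rw [if_neg h2]
      simp only [Bool.or_eq_true, not_or, Bool.not_eq_true] at h2
      simp [h1', h2.1, h2.2]

theorem pv_op_eq (c : Char) (r : List Char) :
    operatorchecker (c :: r)
      = (((c :: r).countP pvPOp == 1) && ((c :: r).length == 1)) := by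
  unfold operatorchecker
  cases r with
  | cons x xs => simp [List.countP_cons]
  | nil =>
    rw [pv_pyGet_zero]
    simp only [List.length_singleton, gt_iff_lt, Nat.lt_irrefl, if_false, List.countP_cons,
      List.countP_nil, pvPOp_eq]
    by_cases h : c ∈ pvOperators <;> simp [List.contains_eq_mem, h]

theorem pv_label_eq (c : Char) (r : List Char) : pvLabelA (c :: r) = pvLabelB (c :: r) := by
  unfold pvLabelA pvLabelB
  simp only [pvCensus_eq, pv_pyGet_zero, pv_pyGet_neg_one, Option.some_beq_some,
    pv_id_eq, pv_num_eq, pv_op_eq]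

-- every token produced by split() is nonempty
theorem pv_split0_go_nonempty (l : List Char) : ∀ (cur : List Char) (acc : List (List Char)),
    (∀ t ∈ acc, t ≠ []) → ∀ t ∈ PySem.Chars.split₀.go l cur acc, t ≠ ([] : List Char) := by
  induction l with
  | nil =>
    intro cur acc hacc t ht
    rw [PySem.Chars.split₀.go] at ht
    split at ht
    · exact hacc t (by simpa using ht)
    · rw [List.mem_reverse, List.mem_cons] at ht
      rcases ht with rfl | ht
      · simp_all [List.isEmpty_iff]
      · exact hacc t (by simpa using ht)
  | cons c rest ih =>
    intro cur acc hacc t ht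
    rw [PySem.Chars.split₀.go] at ht
    split at ht
    · split at ht
      · exact ih [] acc hacc t ht
      · refine ih [] _ ?_ t ht
        intro u hu
        rcases List.mem_cons.1 hu with h | h
        · subst h; simp_all [List.isEmpty_iff]
        · exact hacc u h
    · exact ih (c :: cur) acc hacc t ht

theorem pv_parts_nonempty (s : List Char) : ∀ t ∈ PySem.Chars.split₀ s, t ≠ [] :=
  fun t ht => pv_split0_go_nonempty s [] [] (by simp) t ht

-- fold-with-append over the split is map of the label function
theorem pv_foldl_label (f : List Char → String) (l : List (List Char)) (a : List String) :
    (l.map String.ofList).foldl (fun acc t => acc ++ [f t.toList]) a = a ++ l.map f := by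
  induction l generalizing a with
  | nil => simp
  | cons x xs ih => simp [ih]

theorem pv_tokenlister_map (s : String) :
    tokenlister s = (PySem.Chars.split₀ s.toList).map pvLabelA := by
  unfold tokenlister
  have hbody : (fun (mylist : List String) (i : String) =>
      if IdentifierChecker i.toList then mylist ++ ["ID"]
      else if numchecker i.toList then mylist ++ ["Number"]
      else if operatorchecker i.toList then mylist ++ ["Operator"]
      else mylist ++ ["Unknown_token"])
      = (fun (mylist : List String) (i : String) => mylist ++ [pvLabelA i.toList]) := by
    funext mylist i
    unfold pvLabelA
    split_ifs <;> rfl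
  rw [hbody]
  show ((PySem.Chars.split₀ s.toList).map String.ofList).foldl _ [] = _
  rw [pv_foldl_label]
  rfl

theorem pv_tokenlister_alt_map (s : String) :
    tokenlister_alt s = (PySem.Chars.split₀ s.toList).map pvLabelB := by
  unfold tokenlister_alt
  have hbody : (fun (out : List String) (tok : String) =>
      let cs := tok.toList
      let c := pvCensus cs
      let n := cs.length
      if (match PySem.List.pyGet? cs 0 with
          | some h => PySem.Chars.isalpha h
          | none => false) && (c.1 + c.2.1 == n) then out ++ ["ID"]
      else if (c.2.2.1 ≤ 1) && (c.2.1 + c.2.2.1 == n)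
          && !(PySem.List.pyGet? cs 0 == some '.') && !(PySem.List.pyGet? cs (-1) == some '.') then out ++ ["Number"]
      else if (c.2.2.2 == 1) && (n == 1) then out ++ ["Operator"]
      else out ++ ["Unknown_token"])
      = (fun (out : List String) (tok : String) => out ++ [pvLabelB tok.toList]) := by
    funext out tok
    simp only [pvLabelB]
    split_ifs <;> rfl
  rw [hbody]
  show ((PySem.Chars.split₀ s.toList).map String.ofList).foldl _ [] = _
  rw [pv_foldl_label]
  rfl

-- ===== VERDICT (by name: the statement is the Claim_ definition above) =====
theorem tokenlister_spec : Claim_equal_tokenlister := by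
  intro s _
  unfold Spec_tokenlister
  rw [pv_tokenlister_map, pv_tokenlister_alt_map]
  apply List.map_congr_left
  intro t ht
  cases t with
  | nil => exact absurd rfl (pv_parts_nonempty s.toList [] ht)
  | cons c r => exact pv_label_eq c r
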